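-- pv_equiv track=rewrite | github.com/koenigermarco-tapin/Tap-In-App | translate-stripe-to-german.py | fix_internal_links
-- ===== SOURCE A (Python) =====
-- def fix_internal_links(content, belt_name):
--     """Update all internal links to point to -de.html versions"""
--
--     # Pattern: href="filename.html" -> href="filename-de.html"
--     # But NOT for external links or files that don't have German versions
--     patterns = [
--         (r'href="([^"]+\.html)"', r'href="\1"'),  # We'll process this more carefully
--         (r'href="([^"]*belt[^"]*\.html)"', r'href="\1"'),
--         (r'href="([^"]*stripe[^"]*\.html)"', r'href="\1"'),
--         (r'href="([^"]*dashboard[^"]*\.html)"', r'href="\1"'),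
--         (r'href="([^"]*hub[^"]*\.html)"', r'href="\1"'),
--         (r'href="([^"]*assessment[^"]*\.html)"', r'href="\1"'),
--     ]
--
--     # More targeted link replacement
--     link_replacements = {
--         'white-belt.html': 'white-belt-de.html',
--         'blue-belt.html': 'blue-belt-de.html',
--         'purple-belt.html': 'purple-belt-de.html',
--         'brown-belt.html': 'brown-belt-de.html',
--         'black-belt.html': 'black-belt-de.html',
--         'gym-dashboard.html': 'gym-dashboard-de.html',
--         'learning-hub.html': 'learning-hub-de.html',
--         'hub-assessment-center.html': 'hub-assessment-center-de.html',
--     }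
--
--     # Add stripe links
--     for i in range(1, 5):
--         belt_prefix = belt_name.lower().replace('-belt', '')
--         old_link = f'{belt_prefix}-belt-stripe{i}-gamified.html'
--         new_link = f'{belt_prefix}-belt-stripe{i}-gamified-de.html'
--         link_replacements[old_link] = new_link
--
--         # Also handle carousel versions
--         old_carousel = f'{belt_prefix}-belt-stripe{i}-carousel-NEW.html'
--         new_carousel = f'{belt_prefix}-belt-stripe{i}-carousel-NEW-de.html'
--         link_replacements[old_carousel] = new_carousel
--
--     # Replace links
--     for old, new in link_replacements.items():
--         # Only replace if it's not already a -de.html link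
--         if not old.endswith('-de.html'):
--             content = content.replace(f'href="{old}"', f'href="{new}"')
--             content = content.replace(f"href='{old}'", f"href='{new}'")
--             content = content.replace(f'window.location.href = "{old}"', f'window.location.href = "{new}"')
--             content = content.replace(f"window.location.href = '{old}'", f"window.location.href = '{new}'")
--
--     return content
-- ===== SOURCE B (Python) =====
-- def _apply(text, pairs):
--     if not pairs:
--         return text
--     (old, new), rest = pairs[0], pairs[1:]
--     return _apply(text.replace(old, new), rest)
--
--
-- def fix_internal_links(content, belt_name):
--     """Update all internal links to point to -de.html versions."""
--     prefix = belt_name.lower().replace('-belt', '')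
--     names = [b + '-belt.html' for b in ('white', 'blue', 'purple', 'brown', 'black')]
--     names += ['gym-dashboard.html', 'learning-hub.html', 'hub-assessment-center.html']
--     names += [f'{prefix}-belt-stripe{i}-{kind}.html'
--               for i in range(1, 5) for kind in ('gamified', 'carousel-NEW')]
--     templates = ['href="{}"', "href='{}'",
--                  'window.location.href = "{}"', "window.location.href = '{}'"]
--     pairs = [(t.format(old), t.format(old[:-5] + '-de.html'))
--              for old in names for t in templates]
--     return _apply(content, pairs)
-- ===== Notes on version B (the rewrite author's own statement) =====
-- stated objective: simpler
-- what changed: B drops the dead patterns list and the dict entirely: it enumerates the 16 target filenames declaratively, derives each replacement name by suffix surgery (old[:-5] + '-de.html') instead of a second parallel set of f-strings, builds the 64 (search, replacement) context pairs as a product of 4 quote-context templates x 16 filenames, and applies them with one recursive fold of str.replace in A's order.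
import Mathlib
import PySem

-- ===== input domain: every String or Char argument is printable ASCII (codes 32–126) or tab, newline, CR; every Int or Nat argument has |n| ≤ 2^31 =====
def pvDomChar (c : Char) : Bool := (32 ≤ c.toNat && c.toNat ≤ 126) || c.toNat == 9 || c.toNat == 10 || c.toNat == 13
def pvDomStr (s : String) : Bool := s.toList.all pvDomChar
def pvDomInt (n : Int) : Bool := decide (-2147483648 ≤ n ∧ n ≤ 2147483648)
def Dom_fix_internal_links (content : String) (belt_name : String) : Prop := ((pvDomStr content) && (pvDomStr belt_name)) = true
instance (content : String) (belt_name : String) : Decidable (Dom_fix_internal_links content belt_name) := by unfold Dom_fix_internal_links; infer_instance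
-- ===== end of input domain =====

-- B is a simpler decomposition of the same replacement sequence (no dict, no dead
-- pattern list, the 64 context pairs enumerated as a product and applied by one
-- recursive fold); same cost, equal output proved for all inputs.

-- ===== PORT A =====
-- A works on Python str; the port computes on List Char (PySem.Chars) and wraps.
def fixA_core (content : List Char) (belt_name : List Char) : List Char :=
  let _patterns : List (List Char × List Char) := [
    ("href=\"([^\"]+\\.html)\"".toList, "href=\"\\1\"".toList),
    ("href=\"([^\"]*belt[^\"]*\\.html)\"".toList, "href=\"\\1\"".toList),
    ("href=\"([^\"]*stripe[^\"]*\\.html)\"".toList, "href=\"\\1\"".toList),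
    ("href=\"([^\"]*dashboard[^\"]*\\.html)\"".toList, "href=\"\\1\"".toList),
    ("href=\"([^\"]*hub[^\"]*\\.html)\"".toList, "href=\"\\1\"".toList),
    ("href=\"([^\"]*assessment[^\"]*\\.html)\"".toList, "href=\"\\1\"".toList)]
  let link0 : PySem.Dict (List Char) (List Char) := PySem.Dict.mk [
    ("white-belt.html".toList, "white-belt-de.html".toList),
    ("blue-belt.html".toList, "blue-belt-de.html".toList),
    ("purple-belt.html".toList, "purple-belt-de.html".toList),
    ("brown-belt.html".toList, "brown-belt-de.html".toList),
    ("black-belt.html".toList, "black-belt-de.html".toList),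
    ("gym-dashboard.html".toList, "gym-dashboard-de.html".toList),
    ("learning-hub.html".toList, "learning-hub-de.html".toList),
    ("hub-assessment-center.html".toList, "hub-assessment-center-de.html".toList)]
  let link_replacements := (PySem.List.pyRange 1 5 1).foldl (fun d i =>
    let belt_prefix := PySem.Chars.replace (PySem.Chars.lower belt_name) "-belt".toList "".toList
    let old_link := belt_prefix ++ "-belt-stripe".toList ++ PySem.Int.toChars i ++ "-gamified.html".toList
    let new_link := belt_prefix ++ "-belt-stripe".toList ++ PySem.Int.toChars i ++ "-gamified-de.html".toList
    let d := d.insert old_link new_link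
    let old_carousel := belt_prefix ++ "-belt-stripe".toList ++ PySem.Int.toChars i ++ "-carousel-NEW.html".toList
    let new_carousel := belt_prefix ++ "-belt-stripe".toList ++ PySem.Int.toChars i ++ "-carousel-NEW-de.html".toList
    d.insert old_carousel new_carousel) link0
  link_replacements.items.foldl (fun content kv =>
    if (! PySem.Chars.endswith kv.1 "-de.html".toList) = true then
      let c1 := PySem.Chars.replace content ("href=\"".toList ++ kv.1 ++ "\"".toList) ("href=\"".toList ++ kv.2 ++ "\"".toList)
      let c2 := PySem.Chars.replace c1 ("href='".toList ++ kv.1 ++ "'".toList) ("href='".toList ++ kv.2 ++ "'".toList)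
      let c3 := PySem.Chars.replace c2 ("window.location.href = \"".toList ++ kv.1 ++ "\"".toList) ("window.location.href = \"".toList ++ kv.2 ++ "\"".toList)
      PySem.Chars.replace c3 ("window.location.href = '".toList ++ kv.1 ++ "'".toList) ("window.location.href = '".toList ++ kv.2 ++ "'".toList)
    else content) content

def fix_internal_links (content : String) (belt_name : String) : String :=
  String.ofList (fixA_core content.toList belt_name.toList)

-- ===== PORT B =====
def fixB_applyPairs : List Char → List (List Char × List Char) → List Char
  | t, [] => t
  | t, (o, n) :: rest => fixB_applyPairs (PySem.Chars.replace t o n) rest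

def fixB_core (content : List Char) (belt_name : List Char) : List Char :=
  let pfx := PySem.Chars.replace (PySem.Chars.lower belt_name) "-belt".toList "".toList
  let names := (["white".toList, "blue".toList, "purple".toList, "brown".toList, "black".toList].map
      (fun b => b ++ "-belt.html".toList))
    ++ ["gym-dashboard.html".toList, "learning-hub.html".toList, "hub-assessment-center.html".toList]
    ++ (PySem.List.pyRange 1 5 1).flatMap (fun i =>
        ["gamified".toList, "carousel-NEW".toList].map (fun kind =>
          pfx ++ "-belt-stripe".toList ++ PySem.Int.toChars i ++ "-".toList ++ kind ++ ".html".toList))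
  let templates : List (List Char × List Char) := [
    ("href=\"".toList, "\"".toList), ("href='".toList, "'".toList),
    ("window.location.href = \"".toList, "\"".toList), ("window.location.href = '".toList, "'".toList)]
  let pairs := names.flatMap (fun old =>
    templates.map (fun t => (t.1 ++ old ++ t.2,
      t.1 ++ (PySem.Chars.slice old none (some (-5)) ++ "-de.html".toList) ++ t.2)))
  fixB_applyPairs content pairs

def fix_internal_links_alt (content : String) (belt_name : String) : String :=
  String.ofList (fixB_core content.toList belt_name.toList)

-- ===== PRECONDITION & SPEC =====
def Spec_fix_internal_links (content : String) (belt_name : String) (out : String) : Prop := out = fix_internal_links_alt content belt_name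
instance (content : String) (belt_name : String) (out : String) : Decidable (Spec_fix_internal_links content belt_name out) := by unfold Spec_fix_internal_links; infer_instance

-- ===== CLAIM (what is proved, stated in full; the proofs are below) =====
def Claim_equal_fix_internal_links : Prop := ∀ (content : String) (belt_name : String), Dom_fix_internal_links content belt_name → Spec_fix_internal_links content belt_name (fix_internal_links content belt_name)

-- ===== LEMMAS AND PROOFS =====

-- a concrete-length key can never equal p ++ (a longer concrete tail)
theorem pvBeqFalseOfLenLt (a s u : List Char) (h : a.length < s.length) :
    (a == u ++ s) = false := by
  simp only [beq_eq_false_iff_ne]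
  intro he
  have hl := congrArg List.length he
  simp only [List.length_append] at hl
  omega

-- p ++ s never ends with "-de.html" when s's own last 8 chars are not "-de.html"
theorem pvEndsDe (u s : List Char) (h8 : 8 ≤ s.length)
    (hne : s.drop (s.length - 8) ≠ "-de.html".toList) :
    PySem.Chars.endswith (u ++ s) "-de.html".toList = false := by
  rw [Bool.eq_false_iff]
  intro hE
  obtain ⟨t, ht⟩ := (PySem.Chars.endswith_iff _ _).1 hE
  apply hne
  have hlen := congrArg List.length ht
  simp only [List.length_append] at hlen
  have h8' : "-de.html".toList.length = 8 := by decide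
  have hdrop := congrArg (List.drop t.length) ht
  rw [List.drop_left, List.drop_append] at hdrop
  have hu : u.length ≤ t.length := by omega
  rw [List.drop_eq_nil_of_le hu, List.nil_append] at hdrop
  have : t.length - u.length = s.length - 8 := by omega
  rw [this] at hdrop
  exact hdrop.symm

theorem pvEndsDeG1 (u : List Char) : PySem.Chars.endswith (u ++ ['-', 'b', 'e', 'l', 't', '-', 's', 't', 'r', 'i', 'p', 'e', '1', '-', 'g', 'a', 'm', 'i', 'f', 'i', 'e', 'd', '.', 'h', 't', 'm', 'l']) ['-', 'd', 'e', '.', 'h', 't', 'm', 'l'] = false := pvEndsDe u _ (by decide) (by decide)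
theorem pvEndsDeC1 (u : List Char) : PySem.Chars.endswith (u ++ ['-', 'b', 'e', 'l', 't', '-', 's', 't', 'r', 'i', 'p', 'e', '1', '-', 'c', 'a', 'r', 'o', 'u', 's', 'e', 'l', '-', 'N', 'E', 'W', '.', 'h', 't', 'm', 'l']) ['-', 'd', 'e', '.', 'h', 't', 'm', 'l'] = false := pvEndsDe u _ (by decide) (by decide)
theorem pvEndsDeG2 (u : List Char) : PySem.Chars.endswith (u ++ ['-', 'b', 'e', 'l', 't', '-', 's', 't', 'r', 'i', 'p', 'e', '2', '-', 'g', 'a', 'm', 'i', 'f', 'i', 'e', 'd', '.', 'h', 't', 'm', 'l']) ['-', 'd', 'e', '.', 'h', 't', 'm', 'l'] = false := pvEndsDe u _ (by decide) (by decide)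
theorem pvEndsDeC2 (u : List Char) : PySem.Chars.endswith (u ++ ['-', 'b', 'e', 'l', 't', '-', 's', 't', 'r', 'i', 'p', 'e', '2', '-', 'c', 'a', 'r', 'o', 'u', 's', 'e', 'l', '-', 'N', 'E', 'W', '.', 'h', 't', 'm', 'l']) ['-', 'd', 'e', '.', 'h', 't', 'm', 'l'] = false := pvEndsDe u _ (by decide) (by decide)
theorem pvEndsDeG3 (u : List Char) : PySem.Chars.endswith (u ++ ['-', 'b', 'e', 'l', 't', '-', 's', 't', 'r', 'i', 'p', 'e', '3', '-', 'g', 'a', 'm', 'i', 'f', 'i', 'e', 'd', '.', 'h', 't', 'm', 'l']) ['-', 'd', 'e', '.', 'h', 't', 'm', 'l'] = false := pvEndsDe u _ (by decide) (by decide)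
theorem pvEndsDeC3 (u : List Char) : PySem.Chars.endswith (u ++ ['-', 'b', 'e', 'l', 't', '-', 's', 't', 'r', 'i', 'p', 'e', '3', '-', 'c', 'a', 'r', 'o', 'u', 's', 'e', 'l', '-', 'N', 'E', 'W', '.', 'h', 't', 'm', 'l']) ['-', 'd', 'e', '.', 'h', 't', 'm', 'l'] = false := pvEndsDe u _ (by decide) (by decide)
theorem pvEndsDeG4 (u : List Char) : PySem.Chars.endswith (u ++ ['-', 'b', 'e', 'l', 't', '-', 's', 't', 'r', 'i', 'p', 'e', '4', '-', 'g', 'a', 'm', 'i', 'f', 'i', 'e', 'd', '.', 'h', 't', 'm', 'l']) ['-', 'd', 'e', '.', 'h', 't', 'm', 'l'] = false := pvEndsDe u _ (by decide) (by decide)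
theorem pvEndsDeC4 (u : List Char) : PySem.Chars.endswith (u ++ ['-', 'b', 'e', 'l', 't', '-', 's', 't', 'r', 'i', 'p', 'e', '4', '-', 'c', 'a', 'r', 'o', 'u', 's', 'e', 'l', '-', 'N', 'E', 'W', '.', 'h', 't', 'm', 'l']) ['-', 'd', 'e', '.', 'h', 't', 'm', 'l'] = false := pvEndsDe u _ (by decide) (by decide)

-- old[:-5] on p ++ (concrete tail)
theorem pvSlice5 (u s : List Char) (h : 5 ≤ s.length) :
    PySem.List.slice (u ++ s) none (some (-5)) = u ++ s.take (s.length - 5) := by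
  have hb : PySem.List.clampIdx (u ++ s).length (-5) = u.length + (s.length - 5) := by
    simp only [PySem.List.clampIdx, List.length_append]
    split_ifs with h1 h2 <;> omega
  simp only [PySem.List.slice, hb, Nat.sub_zero, List.drop_zero,
    List.take_append]
  rw [List.take_of_length_le (by omega), Nat.add_sub_cancel_left]

theorem pvSliceG1 (u : List Char) : PySem.List.slice (u ++ ['-', 'b', 'e', 'l', 't', '-', 's', 't', 'r', 'i', 'p', 'e', '1', '-', 'g', 'a', 'm', 'i', 'f', 'i', 'e', 'd', '.', 'h', 't', 'm', 'l']) none (some (-5)) = u ++ ['-', 'b', 'e', 'l', 't', '-', 's', 't', 'r', 'i', 'p', 'e', '1', '-', 'g', 'a', 'm', 'i', 'f', 'i', 'e', 'd'] := by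
  rw [pvSlice5 u _ (by decide)]; congr 1
theorem pvSliceC1 (u : List Char) : PySem.List.slice (u ++ ['-', 'b', 'e', 'l', 't', '-', 's', 't', 'r', 'i', 'p', 'e', '1', '-', 'c', 'a', 'r', 'o', 'u', 's', 'e', 'l', '-', 'N', 'E', 'W', '.', 'h', 't', 'm', 'l']) none (some (-5)) = u ++ ['-', 'b', 'e', 'l', 't', '-', 's', 't', 'r', 'i', 'p', 'e', '1', '-', 'c', 'a', 'r', 'o', 'u', 's', 'e', 'l', '-', 'N', 'E', 'W'] := by
  rw [pvSlice5 u _ (by decide)]; congr 1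
theorem pvSliceG2 (u : List Char) : PySem.List.slice (u ++ ['-', 'b', 'e', 'l', 't', '-', 's', 't', 'r', 'i', 'p', 'e', '2', '-', 'g', 'a', 'm', 'i', 'f', 'i', 'e', 'd', '.', 'h', 't', 'm', 'l']) none (some (-5)) = u ++ ['-', 'b', 'e', 'l', 't', '-', 's', 't', 'r', 'i', 'p', 'e', '2', '-', 'g', 'a', 'm', 'i', 'f', 'i', 'e', 'd'] := by
  rw [pvSlice5 u _ (by decide)]; congr 1
theorem pvSliceC2 (u : List Char) : PySem.List.slice (u ++ ['-', 'b', 'e', 'l', 't', '-', 's', 't', 'r', 'i', 'p', 'e', '2', '-', 'c', 'a', 'r', 'o', 'u', 's', 'e', 'l', '-', 'N', 'E', 'W', '.', 'h', 't', 'm', 'l']) none (some (-5)) = u ++ ['-', 'b', 'e', 'l', 't', '-', 's', 't', 'r', 'i', 'p', 'e', '2', '-', 'c', 'a', 'r', 'o', 'u', 's', 'e', 'l', '-', 'N', 'E', 'W'] := by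
  rw [pvSlice5 u _ (by decide)]; congr 1
theorem pvSliceG3 (u : List Char) : PySem.List.slice (u ++ ['-', 'b', 'e', 'l', 't', '-', 's', 't', 'r', 'i', 'p', 'e', '3', '-', 'g', 'a', 'm', 'i', 'f', 'i', 'e', 'd', '.', 'h', 't', 'm', 'l']) none (some (-5)) = u ++ ['-', 'b', 'e', 'l', 't', '-', 's', 't', 'r', 'i', 'p', 'e', '3', '-', 'g', 'a', 'm', 'i', 'f', 'i', 'e', 'd'] := by
  rw [pvSlice5 u _ (by decide)]; congr 1
theorem pvSliceC3 (u : List Char) : PySem.List.slice (u ++ ['-', 'b', 'e', 'l', 't', '-', 's', 't', 'r', 'i', 'p', 'e', '3', '-', 'c', 'a', 'r', 'o', 'u', 's', 'e', 'l', '-', 'N', 'E', 'W', '.', 'h', 't', 'm', 'l']) none (some (-5)) = u ++ ['-', 'b', 'e', 'l', 't', '-', 's', 't', 'r', 'i', 'p', 'e', '3', '-', 'c', 'a', 'r', 'o', 'u', 's', 'e', 'l', '-', 'N', 'E', 'W'] := by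
  rw [pvSlice5 u _ (by decide)]; congr 1
theorem pvSliceG4 (u : List Char) : PySem.List.slice (u ++ ['-', 'b', 'e', 'l', 't', '-', 's', 't', 'r', 'i', 'p', 'e', '4', '-', 'g', 'a', 'm', 'i', 'f', 'i', 'e', 'd', '.', 'h', 't', 'm', 'l']) none (some (-5)) = u ++ ['-', 'b', 'e', 'l', 't', '-', 's', 't', 'r', 'i', 'p', 'e', '4', '-', 'g', 'a', 'm', 'i', 'f', 'i', 'e', 'd'] := by
  rw [pvSlice5 u _ (by decide)]; congr 1
theorem pvSliceC4 (u : List Char) : PySem.List.slice (u ++ ['-', 'b', 'e', 'l', 't', '-', 's', 't', 'r', 'i', 'p', 'e', '4', '-', 'c', 'a', 'r', 'o', 'u', 's', 'e', 'l', '-', 'N', 'E', 'W', '.', 'h', 't', 'm', 'l']) none (some (-5)) = u ++ ['-', 'b', 'e', 'l', 't', '-', 's', 't', 'r', 'i', 'p', 'e', '4', '-', 'c', 'a', 'r', 'o', 'u', 's', 'e', 'l', '-', 'N', 'E', 'W'] := by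
  rw [pvSlice5 u _ (by decide)]; congr 1
theorem pvSliceF1 : PySem.List.slice ['w', 'h', 'i', 't', 'e', '-', 'b', 'e', 'l', 't', '.', 'h', 't', 'm', 'l'] none (some (-5)) = ['w', 'h', 'i', 't', 'e', '-', 'b', 'e', 'l', 't'] := by decide
theorem pvSliceF2 : PySem.List.slice ['b', 'l', 'u', 'e', '-', 'b', 'e', 'l', 't', '.', 'h', 't', 'm', 'l'] none (some (-5)) = ['b', 'l', 'u', 'e', '-', 'b', 'e', 'l', 't'] := by decide
theorem pvSliceF3 : PySem.List.slice ['p', 'u', 'r', 'p', 'l', 'e', '-', 'b', 'e', 'l', 't', '.', 'h', 't', 'm', 'l'] none (some (-5)) = ['p', 'u', 'r', 'p', 'l', 'e', '-', 'b', 'e', 'l', 't'] := by decide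
theorem pvSliceF4 : PySem.List.slice ['b', 'r', 'o', 'w', 'n', '-', 'b', 'e', 'l', 't', '.', 'h', 't', 'm', 'l'] none (some (-5)) = ['b', 'r', 'o', 'w', 'n', '-', 'b', 'e', 'l', 't'] := by decide
theorem pvSliceF5 : PySem.List.slice ['b', 'l', 'a', 'c', 'k', '-', 'b', 'e', 'l', 't', '.', 'h', 't', 'm', 'l'] none (some (-5)) = ['b', 'l', 'a', 'c', 'k', '-', 'b', 'e', 'l', 't'] := by decide
theorem pvSliceF6 : PySem.List.slice ['g', 'y', 'm', '-', 'd', 'a', 's', 'h', 'b', 'o', 'a', 'r', 'd', '.', 'h', 't', 'm', 'l'] none (some (-5)) = ['g', 'y', 'm', '-', 'd', 'a', 's', 'h', 'b', 'o', 'a', 'r', 'd'] := by decide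
theorem pvSliceF7 : PySem.List.slice ['l', 'e', 'a', 'r', 'n', 'i', 'n', 'g', '-', 'h', 'u', 'b', '.', 'h', 't', 'm', 'l'] none (some (-5)) = ['l', 'e', 'a', 'r', 'n', 'i', 'n', 'g', '-', 'h', 'u', 'b'] := by decide
theorem pvSliceF8 : PySem.List.slice ['h', 'u', 'b', '-', 'a', 's', 's', 'e', 's', 's', 'm', 'e', 'n', 't', '-', 'c', 'e', 'n', 't', 'e', 'r', '.', 'h', 't', 'm', 'l'] none (some (-5)) = ['h', 'u', 'b', '-', 'a', 's', 's', 'e', 's', 's', 'm', 'e', 'n', 't', '-', 'c', 'e', 'n', 't', 'e', 'r'] := by decide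

-- the loop inserting two keys per index, as a single-insert fold over pairs
theorem pvFoldlDouble (l : List Int) (k1 v1 k2 v2 : Int → List Char)
    (d : PySem.Dict (List Char) (List Char)) :
    l.foldl (fun d i => (d.insert (k1 i) (v1 i)).insert (k2 i) (v2 i)) d
      = (l.flatMap (fun i => [(k1 i, v1 i), (k2 i, v2 i)])).foldl (fun d a => d.insert a.1 a.2) d := by
  induction l generalizing d with
  | nil => rfl
  | cons x xs ih => simp only [List.foldl_cons, List.flatMap_cons, List.cons_append,
      List.nil_append, ih]

theorem pvItemsDouble (l : List Int) (k1 v1 k2 v2 : Int → List Char)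
    (d : PySem.Dict (List Char) (List Char))
    (hfresh : ∀ i ∈ l, d.contains (k1 i) = false ∧ d.contains (k2 i) = false)
    (hnodup : (l.flatMap (fun i => [(k1 i, v1 i), (k2 i, v2 i)])).map Prod.fst |>.Nodup) :
    (l.foldl (fun d i => (d.insert (k1 i) (v1 i)).insert (k2 i) (v2 i)) d).items
      = d.items ++ l.flatMap (fun i => [(k1 i, v1 i), (k2 i, v2 i)]) := by
  rw [pvFoldlDouble]
  have h := PySem.Dict.items_foldl_insert_fresh
      (l.flatMap (fun i => [(k1 i, v1 i), (k2 i, v2 i)])) Prod.fst Prod.snd d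
      (by
        intro a ha
        simp only [List.mem_flatMap, List.mem_cons, List.not_mem_nil, or_false] at ha
        obtain ⟨i, hi, hcase⟩ := ha
        rcases hcase with h1 | h2
        · subst h1; exact (hfresh i hi).1
        · subst h2; exact (hfresh i hi).2)
      hnodup
  simpa using h


theorem pvT1 : PySem.Int.toChars 1 = ['1'] := by decide
theorem pvT2 : PySem.Int.toChars 2 = ['2'] := by decide
theorem pvT3 : PySem.Int.toChars 3 = ['3'] := by decide
theorem pvT4 : PySem.Int.toChars 4 = ['4'] := by decide

theorem pvEF1 : PySem.Chars.endswith ['w', 'h', 'i', 't', 'e', '-', 'b', 'e', 'l', 't', '.', 'h', 't', 'm', 'l'] ['-', 'd', 'e', '.', 'h', 't', 'm', 'l'] = false := by decide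
theorem pvEF2 : PySem.Chars.endswith ['b', 'l', 'u', 'e', '-', 'b', 'e', 'l', 't', '.', 'h', 't', 'm', 'l'] ['-', 'd', 'e', '.', 'h', 't', 'm', 'l'] = false := by decide
theorem pvEF3 : PySem.Chars.endswith ['p', 'u', 'r', 'p', 'l', 'e', '-', 'b', 'e', 'l', 't', '.', 'h', 't', 'm', 'l'] ['-', 'd', 'e', '.', 'h', 't', 'm', 'l'] = false := by decide
theorem pvEF4 : PySem.Chars.endswith ['b', 'r', 'o', 'w', 'n', '-', 'b', 'e', 'l', 't', '.', 'h', 't', 'm', 'l'] ['-', 'd', 'e', '.', 'h', 't', 'm', 'l'] = false := by decide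
theorem pvEF5 : PySem.Chars.endswith ['b', 'l', 'a', 'c', 'k', '-', 'b', 'e', 'l', 't', '.', 'h', 't', 'm', 'l'] ['-', 'd', 'e', '.', 'h', 't', 'm', 'l'] = false := by decide
theorem pvEF6 : PySem.Chars.endswith ['g', 'y', 'm', '-', 'd', 'a', 's', 'h', 'b', 'o', 'a', 'r', 'd', '.', 'h', 't', 'm', 'l'] ['-', 'd', 'e', '.', 'h', 't', 'm', 'l'] = false := by decide
theorem pvEF7 : PySem.Chars.endswith ['l', 'e', 'a', 'r', 'n', 'i', 'n', 'g', '-', 'h', 'u', 'b', '.', 'h', 't', 'm', 'l'] ['-', 'd', 'e', '.', 'h', 't', 'm', 'l'] = false := by decide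
theorem pvEF8 : PySem.Chars.endswith ['h', 'u', 'b', '-', 'a', 's', 's', 'e', 's', 's', 'm', 'e', 'n', 't', '-', 'c', 'e', 'n', 't', 'e', 'r', '.', 'h', 't', 'm', 'l'] ['-', 'd', 'e', '.', 'h', 't', 'm', 'l'] = false := by decide

set_option maxHeartbeats 2000000 in
theorem pvCore (c bn : List Char) : fixA_core c bn = fixB_core c bn := by
  unfold fixA_core fixB_core
  dsimp only
  generalize PySem.Chars.replace (PySem.Chars.lower bn) "-belt".toList "".toList = p
  rw [show PySem.List.pyRange 1 5 1 = [1, 2, 3, 4] from by decide]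
  rw [pvItemsDouble [1, 2, 3, 4]
      (fun i => p ++ "-belt-stripe".toList ++ PySem.Int.toChars i ++ "-gamified.html".toList)
      (fun i => p ++ "-belt-stripe".toList ++ PySem.Int.toChars i ++ "-gamified-de.html".toList)
      (fun i => p ++ "-belt-stripe".toList ++ PySem.Int.toChars i ++ "-carousel-NEW.html".toList)
      (fun i => p ++ "-belt-stripe".toList ++ PySem.Int.toChars i ++ "-carousel-NEW-de.html".toList)
      _
      (by
        intro i hi
        fin_cases hi <;>
          constructor <;>
            simp [PySem.Dict.contains, pvT1, pvT2, pvT3, pvT4, pvBeqFalseOfLenLt])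
      (by
        simp [pvT1, pvT2, pvT3, pvT4])]
  simp [fixB_applyPairs, pvT1, pvT2, pvT3, pvT4,
        pvEndsDeG1, pvEndsDeG2, pvEndsDeG3, pvEndsDeG4,
        pvEndsDeC1, pvEndsDeC2, pvEndsDeC3, pvEndsDeC4,
        pvSliceG1, pvSliceG2, pvSliceG3, pvSliceG4,
        pvSliceC1, pvSliceC2, pvSliceC3, pvSliceC4,
        pvSliceF1, pvSliceF2, pvSliceF3, pvSliceF4, pvSliceF5, pvSliceF6, pvSliceF7, pvSliceF8,
        pvEF1, pvEF2, pvEF3, pvEF4, pvEF5, pvEF6, pvEF7, pvEF8,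
        List.append_assoc]

-- ===== VERDICT (by name: the statement is the Claim_ definition above) =====
theorem fix_internal_links_spec : Claim_equal_fix_internal_links := by
  intro content belt_name _
  unfold Spec_fix_internal_links fix_internal_links fix_internal_links_alt
  rw [pvCore]
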